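-- pv_equiv track=rewrite | github.com/RoelCastano/MI8Team | SimilarityFeature/TextParser.py | find_first_braces
-- ===== SOURCE A (Python) =====
-- def find_first_braces(text):
--
--     opening_brace = text.find("{{")
--     closing_brace = text.find("}}")
--     first = opening_brace
--     last = -1
--
--     # if opening_brace==-1 or closing_brace==-1:
--         # return(-1,-1)
--
--     #else :
--     stack = []
--     while(closing_brace!=-1) :
--         # found opening braces {{ : push
--         if opening_brace<closing_brace and opening_brace != -1:
--             stack.append(opening_brace)
--             if closing_brace !=-1:
--                 opening_brace=text.find("{{",opening_brace+2,len(text))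
--
--         # found closing braces    }} : pop
--         elif closing_brace<opening_brace or opening_brace==-1:
--             if stack :
--                 stack.pop()
--                 if closing_brace !=-1:
--                     last = closing_brace+1
--                 closing_brace = text.find("}}",closing_brace+2,len(text))
--
--         # check if stack is empty
--         if not stack :
--             return (first,last)
--
--     # return (-1,-1) if stack is not empty
--     if stack :
--         last = -1
--
--     return (first,last)
-- ===== SOURCE B (Python) =====
-- def find_first_braces(text):
--     first = text.find("{{")
--     depth = 0
--     i = 0
--     n = len(text)
--     while i + 1 < n:
--         pair = text[i:i+2]
--         if pair == "{{":
--             depth += 1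
--             i += 2
--         elif pair == "}}":
--             if depth == 0:
--                 return (first, -1)
--             depth -= 1
--             if depth == 0:
--                 return (first, i + 1)
--             i += 2
--         else:
--             i += 1
--     return (first, -1)
-- ===== Notes on version B (the rewrite author's own statement) =====
-- stated objective: simpler
-- what changed: A merges two independent str.find pointer streams (one for '{{', one for '}}') with an explicit position stack; B does a single left-to-right character scan matching the two-char tokens in place, keeping only an integer depth.
import Mathlib
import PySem

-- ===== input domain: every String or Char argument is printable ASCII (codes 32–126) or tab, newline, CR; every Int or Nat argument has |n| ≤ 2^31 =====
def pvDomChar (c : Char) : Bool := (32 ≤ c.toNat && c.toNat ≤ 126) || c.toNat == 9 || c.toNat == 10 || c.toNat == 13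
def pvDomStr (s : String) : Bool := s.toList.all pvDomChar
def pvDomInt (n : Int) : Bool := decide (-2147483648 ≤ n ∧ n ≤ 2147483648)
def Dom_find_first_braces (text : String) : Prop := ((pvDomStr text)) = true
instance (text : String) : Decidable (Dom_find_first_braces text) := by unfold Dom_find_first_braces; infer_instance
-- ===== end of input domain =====

-- B replaces A's merge of two non-overlapping str.find pointer streams by a single left-to-right
-- character scan holding only an integer depth (objective: simpler decomposition; no speed claim).

def fbOpen : List Char := ['{', '{']
def fbClose : List Char := ['}', '}']

-- ===== PORT A =====
-- A's while loop, step for step.  `fuel` only makes the recursion total; it is never exhausted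
-- (each iteration advances one of the two find pointers by ≥ 2 or returns).
def fbLoopA (cs : List Char) (fuel : Nat) (opening closing : Int)
    (stack : List Int) (first last : Int) : Int × Int :=
  match fuel with
  | 0 => (first, last)
  | fuel + 1 =>
    if closing = -1 then
      -- loop exit: 'if stack: last = -1; return (first, last)'
      (first, if stack = [] then last else -1)
    else if opening < closing ∧ opening ≠ -1 then
      -- push branch; the inner 'if closing != -1' is true here (while guard), so opening advances;
      -- after the body, 'if not stack' is false (just pushed), so the loop continues
      fbLoopA cs fuel (PySem.Chars.findFrom cs fbOpen (opening + 2) (some (cs.length : Int)))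
        closing (opening :: stack) first last
    else if closing < opening ∨ opening = -1 then
      match stack with
      | [] => (first, last)                        -- nothing popped; 'if not stack: return (first, last)'
      | _ :: rest =>
        if rest = [] then (first, closing + 1)     -- pop emptied the stack: return with last = closing+1
        else fbLoopA cs fuel opening
          (PySem.Chars.findFrom cs fbClose (closing + 2) (some (cs.length : Int)))
          rest first (closing + 1)
    else
      -- opening = closing ≠ -1: impossible for occurrence positions of "{{" and "}}";
      -- Python would loop forever on unchanged state, mirrored by fuel exhaustion
      if stack = [] then (first, last) else fbLoopA cs fuel opening closing stack first last

def find_first_braces (text : String) : Int × Int :=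
  let cs := text.toList
  let opening := PySem.Chars.find cs fbOpen
  let closing := PySem.Chars.find cs fbClose
  fbLoopA cs (cs.length + 2) opening closing [] opening (-1)

-- ===== PORT B =====
-- B's while loop: text[i:i+2] is (cs.drop i).take 2 (0 ≤ i, so this is exactly the Python slice).
def fbScanB (cs : List Char) (first : Int) (i depth : Nat) : Int × Int :=
  if h : i + 1 < cs.length then
    if (cs.drop i).take 2 = fbOpen then fbScanB cs first (i + 2) (depth + 1)
    else if (cs.drop i).take 2 = fbClose then
      if depth = 0 then (first, -1)
      else
        let depth := depth - 1
        if depth = 0 then (first, (i : Int) + 1)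
        else fbScanB cs first (i + 2) depth
    else fbScanB cs first (i + 1) depth
  else (first, -1)
termination_by cs.length - i
decreasing_by all_goals omega

def find_first_braces_alt (text : String) : Int × Int :=
  let cs := text.toList
  fbScanB cs (PySem.Chars.find cs fbOpen) 0 0

-- ===== PRECONDITION & SPEC =====
def Spec_find_first_braces (text : String) (out : Int × Int) : Prop := out = find_first_braces_alt text
instance (text : String) (out : Int × Int) : Decidable (Spec_find_first_braces text out) := by unfold Spec_find_first_braces; infer_instance

-- ===== CLAIM (what is proved, stated in full; the proofs are below) =====
def Claim_equal_find_first_braces : Prop := ∀ (text : String), Dom_find_first_braces text → Spec_find_first_braces text (find_first_braces text)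

-- ===== LEMMAS AND PROOFS =====

-- `text.find(tok, i)` for a Nat position i, as used throughout the proof
def ff (cs tok : List Char) (i : Nat) : Int := PySem.Chars.findFrom cs tok (i : Int) none

theorem findFrom_some_len (cs sub : List Char) (k : Int) :
    PySem.Chars.findFrom cs sub k (some (cs.length : Int)) = PySem.Chars.findFrom cs sub k none := by
  have h0 : ¬((cs.length : Int) < 0) := by omega
  simp [PySem.Chars.findFrom, h0]

-- a prefix of a later drop is an infix of an earlier drop
theorem prefix_drop_infix {tok cs : List Char} {k m : Nat} (hkm : k ≤ m)
    (h : tok <+: cs.drop m) : tok <:+: cs.drop k := by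
  have hd : cs.drop m = (cs.drop k).drop (m - k) := by
    rw [List.drop_drop]; congr 1; omega
  rw [hd] at h
  exact h.isInfix.trans (List.drop_suffix _ _).isInfix
theorem ff_eq_neg_one (cs tok : List Char) (i : Nat) (hi : i ≤ cs.length) :
    ff cs tok i = -1 ↔ ¬ tok <:+: cs.drop i :=
  PySem.Chars.findFrom_natCast_eq_neg_one_iff cs tok i hi
theorem ff_spec (cs tok : List Char) (i : Nat) (hi : i ≤ cs.length) (h : ff cs tok i ≠ -1) :
    (i : Int) ≤ ff cs tok i ∧ tok <+: cs.drop (ff cs tok i).toNat ∧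
      ∀ j : Nat, i ≤ j → j < (ff cs tok i).toNat → ¬ tok <+: cs.drop j :=
  PySem.Chars.findFrom_natCast_spec cs tok i hi h
-- restarting find at a later point before (or at) its result does not change the result
theorem ff_restart (cs tok : List Char) (i j : Nat) (hij : i ≤ j) (hj : j ≤ cs.length)
    (hi : i ≤ cs.length) (h : ff cs tok i = -1 ∨ (j : Int) ≤ ff cs tok i) :
    ff cs tok j = ff cs tok i := by
  have hdj : cs.drop j = (cs.drop i).drop (j - i) := by rw [List.drop_drop]; congr 1; omega
  rcases h with h | h
  · rw [h, ff_eq_neg_one cs tok j hj]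
    rw [ff_eq_neg_one cs tok i hi] at h
    intro hin
    exact h (by rw [hdj] at hin; exact hin.trans (List.drop_suffix _ _).isInfix)
  · have hne : ff cs tok i ≠ -1 := by omega
    obtain ⟨hle, hpre, hmin⟩ := ff_spec cs tok i hi hne
    have hvj : (j : Int) ≤ ff cs tok i := h
    have hnej : ff cs tok j ≠ -1 := by
      intro hno
      rw [ff_eq_neg_one cs tok j hj] at hno
      exact hno (prefix_drop_infix (by omega : j ≤ (ff cs tok i).toNat) hpre)
    obtain ⟨hle', hpre', hmin'⟩ := ff_spec cs tok j hj hnej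
    have h1 : ¬ (ff cs tok j).toNat < (ff cs tok i).toNat :=
      fun hlt => hmin (ff cs tok j).toNat (by omega) hlt hpre'
    have h2 : ¬ (ff cs tok i).toNat < (ff cs tok j).toNat :=
      fun hlt => hmin' (ff cs tok i).toNat (by omega) hlt hpre
    omega
-- B's scan walks over a token-free region without changing anything
theorem scan_skip (cs : List Char) (first : Int) (d : Nat) :
    ∀ k i, (∀ j, i ≤ j → j < i + k → ¬ (fbOpen <+: cs.drop j ∨ fbClose <+: cs.drop j)) →
      fbScanB cs first i d = fbScanB cs first (i + k) d := by
  intro k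
  induction k with
  | zero => intro i _; rfl
  | succ k ih =>
    intro i h
    by_cases hlt : i + 1 < cs.length
    · have hnom : ¬ (fbOpen <+: cs.drop i ∨ fbClose <+: cs.drop i) := h i le_rfl (by omega)
      rw [fbScanB]
      simp only [hlt, dif_pos]
      rw [if_neg (fun hp => hnom (Or.inl (List.prefix_iff_eq_take.mpr hp.symm))),
          if_neg (fun hp => hnom (Or.inr (List.prefix_iff_eq_take.mpr hp.symm)))]
      have := ih (i + 1) (fun j hj hj2 => h j (by omega) (by omega))
      rw [show i + 1 + k = i + (k + 1) by omega] at this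
      exact this
    · rw [fbScanB, dif_neg hlt, fbScanB, dif_neg (by omega)]

-- with no "}}" at or after i, B's scan returns (first, -1)
theorem scan_noclose (cs : List Char) (first : Int) :
    ∀ n i d, cs.length - i ≤ n → (∀ j, i ≤ j → ¬ fbClose <+: cs.drop j) →
      fbScanB cs first i d = (first, -1) := by
  intro n
  induction n with
  | zero => intro i d hn h; rw [fbScanB, dif_neg (by omega)]
  | succ n ih =>
    intro i d hn h
    by_cases hlt : i + 1 < cs.length
    · rw [fbScanB]
      simp only [hlt, dif_pos]
      have hnoc : ¬ (cs.drop i).take 2 = fbClose :=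
        fun hp => h i le_rfl (List.prefix_iff_eq_take.mpr hp.symm)
      by_cases hop : (cs.drop i).take 2 = fbOpen
      · rw [if_pos hop]
        exact ih (i + 2) (d + 1) (by omega) (fun j hj => h j (by omega))
      · rw [if_neg hop, if_neg hnoc]
        exact ih (i + 1) d (by omega) (fun j hj => h j (by omega))
    · rw [fbScanB, dif_neg hlt]

-- the main invariant: A's loop with pointers 'next open ≥ i' / 'next close ≥ i' equals B's scan from i
theorem loop_eq (cs : List Char) (first : Int) :
    ∀ fuel i (stack : List Int) (last : Int), i ≤ cs.length → cs.length + 2 ≤ i + 2 * fuel →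
      (stack = [] → last = -1) →
      fbLoopA cs fuel (ff cs fbOpen i) (ff cs fbClose i) stack first last =
        fbScanB cs first i stack.length := by
  intro fuel
  induction fuel with
  | zero => intro i stack last hi hfuel hlast; omega
  | succ fuel ih =>
    intro i stack last hi hfuel hlast
    set o := ff cs fbOpen i with ho
    set c := ff cs fbClose i with hc
    rw [fbLoopA.eq_def]
    dsimp only
    by_cases hcneg : c = -1
    · -- no further "}}": A exits its loop, B scans to the end
      rw [if_pos hcneg]
      have hnoc : ∀ j, i ≤ j → ¬ fbClose <+: cs.drop j := by
        intro j hj hpre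
        exact (ff_eq_neg_one cs fbClose i hi).mp hcneg (prefix_drop_infix hj hpre)
      rw [scan_noclose cs first cs.length i stack.length (by omega) hnoc]
      cases stack with
      | nil => simp [hlast rfl]
      | cons x s => simp
    · rw [if_neg hcneg]
      obtain ⟨hcle, hcpre, hcmin⟩ := ff_spec cs fbClose i hi hcneg
      set cN := c.toNat with hcN
      have hceq : c = (cN : Int) := by omega
      have hclen : cN + 2 ≤ cs.length := by
        have h2 := hcpre.length_le
        rw [List.length_drop] at h2
        simp only [fbClose, List.length_cons, List.length_nil] at h2
        omega
      obtain ⟨ct, hct⟩ := hcpre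
      have hdrop1c : cs.drop (cN + 1) = '}' :: ct := by
        rw [← List.tail_drop, ← hct]; rfl
      by_cases hob : o < c ∧ o ≠ -1
      · -- next token is the open at o: A pushes, B bumps the depth
        rw [if_pos hob]
        obtain ⟨hole, hopre, homin⟩ := ff_spec cs fbOpen i hi hob.2
        set oN := o.toNat with hoN
        have hoeq : o = (oN : Int) := by omega
        have honc : oN < cN := by omega
        obtain ⟨ot, hot⟩ := hopre
        have hdrop1o : cs.drop (oN + 1) = '{' :: ot := by
          rw [← List.tail_drop, ← hot]; rfl
        have hc2 : oN + 2 ≤ cN := by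
          rcases Nat.lt_or_ge cN (oN + 2) with hlt | hge
          · exfalso
            have hcc : cN = oN + 1 := by omega
            rw [hcc, hdrop1o] at hct
            simp [fbClose] at hct
          · exact hge
        have hopen' : PySem.Chars.findFrom cs fbOpen (o + 2) (some (cs.length : Int)) =
            ff cs fbOpen (oN + 2) := by
          have hca : o + 2 = ((oN + 2 : Nat) : Int) := by omega
          rw [findFrom_some_len, hca]; rfl
        have hclose' : ff cs fbClose (oN + 2) = c :=
          ff_restart cs fbClose i (oN + 2) (by omega) (by omega) hi (Or.inr (by omega))
        have hwalk : fbScanB cs first i stack.length = fbScanB cs first oN stack.length := by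
          have hw := scan_skip cs first stack.length (oN - i) i (by
            intro j hj hj2
            rintro (hpre | hpre)
            · exact homin j hj (by omega) hpre
            · exact hcmin j hj (by omega) hpre)
          rw [show i + (oN - i) = oN by omega] at hw
          exact hw
        rw [hwalk, hopen', ← hclose', fbScanB]
        simp only [show oN + 1 < cs.length from by omega, dif_pos]
        rw [if_pos (by rw [← hot]; rfl)]
        exact ih (oN + 2) (o :: stack) last (by omega) (by omega) (by simp)
      · rw [if_neg hob]
        by_cases hco : c < o ∨ o = -1
        · -- next token is the close at cN: A pops (or returns), B decrements the depth
          rw [if_pos hco]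
          have hnoopen : ∀ j, i ≤ j → j < cN → ¬ fbOpen <+: cs.drop j := by
            intro j hj hj2 hpre
            rcases hco with hlt | hneg
            · obtain ⟨_, _, homin⟩ := ff_spec cs fbOpen i hi (by omega : o ≠ -1)
              exact homin j hj (by omega) hpre
            · exact (ff_eq_neg_one cs fbOpen i hi).mp hneg (prefix_drop_infix hj hpre)
          have hwalk : fbScanB cs first i stack.length = fbScanB cs first cN stack.length := by
            have hw := scan_skip cs first stack.length (cN - i) i (by
              intro j hj hj2
              rintro (hpre | hpre)
              · exact hnoopen j hj (by omega) hpre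
              · exact hcmin j hj (by omega) hpre)
            rw [show i + (cN - i) = cN by omega] at hw
            exact hw
          have hnop : ¬ (cs.drop cN).take 2 = fbOpen := by
            rw [← hct]; simp [fbClose, fbOpen]
          have hyesc : (cs.drop cN).take 2 = fbClose := by
            rw [← hct]; rfl
          cases stack with
          | nil =>
            rw [hlast rfl, hwalk, fbScanB]
            simp only [show cN + 1 < cs.length from by omega, dif_pos]
            rw [if_neg hnop, if_pos hyesc]
            simp
          | cons x rest =>
            dsimp only
            by_cases hrest : rest = []
            · subst hrest
              rw [if_pos rfl, hwalk, fbScanB]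
              simp only [show cN + 1 < cs.length from by omega, dif_pos]
              rw [if_neg hnop, if_pos hyesc]
              simp [hceq]
            · rw [if_neg hrest]
              have hclose2 : PySem.Chars.findFrom cs fbClose (c + 2) (some (cs.length : Int)) =
                  ff cs fbClose (cN + 2) := by
                have hca : c + 2 = ((cN + 2 : Nat) : Int) := by omega
                rw [findFrom_some_len, hca]; rfl
              have hopen2 : ff cs fbOpen (cN + 2) = o := by
                rcases hco with hlt | hneg
                · refine ff_restart cs fbOpen i (cN + 2) (by omega) (by omega) hi (Or.inr ?_)
                  -- o > c and o ≠ cN + 1 (an "{{" there would need '{' where cs has '}')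
                  obtain ⟨_, hopre, _⟩ := ff_spec cs fbOpen i hi (by omega : o ≠ -1)
                  by_contra hno
                  have hoc1 : o.toNat = cN + 1 := by omega
                  rw [hoc1, hdrop1c] at hopre
                  obtain ⟨u, hu⟩ := hopre
                  simp [fbOpen] at hu
                · exact ff_restart cs fbOpen i (cN + 2) (by omega) (by omega) hi (Or.inl hneg)
              rw [hwalk, fbScanB]
              simp only [show cN + 1 < cs.length from by omega, dif_pos]
              rw [if_neg hnop, if_pos hyesc]
              rw [if_neg (by simp), hclose2, ← hopen2]
              have hres := ih (cN + 2) rest (c + 1) (by omega) (by omega)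
                (fun hr => absurd hr hrest)
              rw [hres]
              simp only [List.length_cons, Nat.add_sub_cancel]
              rw [if_neg (by simpa using hrest)]
        · -- o = c with both ≠ -1: "{{" and "}}" at the same index, impossible
          exfalso
          have honeg : o ≠ -1 := by omega
          have hoc : o = c := by omega
          obtain ⟨_, hopre, _⟩ := ff_spec cs fbOpen i hi honeg
          rw [show o.toNat = cN by omega, ← hct] at hopre
          obtain ⟨u, hu⟩ := hopre
          simp [fbOpen, fbClose] at hu

-- ===== VERDICT (by name: the statement is the Claim_ definition above) =====
theorem find_first_braces_spec : Claim_equal_find_first_braces := by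
  intro text _
  unfold Spec_find_first_braces find_first_braces find_first_braces_alt
  have h0 : PySem.Chars.find text.toList fbOpen = ff text.toList fbOpen 0 := by
    simp [ff, PySem.Chars.findFrom_zero]
  have h0' : PySem.Chars.find text.toList fbClose = ff text.toList fbClose 0 := by
    simp [ff, PySem.Chars.findFrom_zero]
  simp only [h0, h0']
  exact loop_eq text.toList _ (text.toList.length + 2) 0 [] (-1) (by omega) (by omega) (fun _ => rfl)
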